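-- pv_equiv track=rewrite | github.com/LonghiTW/BlockDropper | data/bloxData.py | map_textures_to_model_ids
-- ===== SOURCE A (Python) =====
-- def map_textures_to_model_ids(all_textures, models_manifest):
--     """
--     Maps texture filenames to Minecraft block IDs using model data.
--     """
--     texture_to_ids = {tex: [] for tex in all_textures}
--
--     # Iterate through all model IDs to find which textures they use
--     for model_id, model_content in models_manifest.items():
--         textures_dict = model_content.get("textures", {})
--
--         for tex_path in textures_dict.values():
--             # Extract name after "minecraft:block/"
--             if "/" in tex_path:
--                 tex_name = tex_path.split("/")[-1]
--             else:
--                 tex_name = tex_path.replace("minecraft:", "")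
--
--             # Link the model ID to the texture if it's in our valid list
--             if tex_name in texture_to_ids:
--                 if model_id not in texture_to_ids[tex_name]:
--                     texture_to_ids[tex_name].append(model_id)
--
--     return texture_to_ids
-- ===== SOURCE B (Python) =====
-- def map_textures_to_model_ids(all_textures, models_manifest):
--     """Inverted traversal: precompute each model's set of short texture names
--     in one staged pass, then for each requested texture scan the models and
--     collect the ids that reference it (no mutated texture->ids accumulator)."""
--     def names_of(content):
--         names = set()
--         for p in content.get("textures", {}).values():
--             names.add(p.split("/")[-1] if "/" in p else p.replace("minecraft:", ""))
--         return names
--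
--     model_names = [(mid, names_of(content)) for mid, content in models_manifest.items()]
--     return {tex: [mid for mid, names in model_names if tex in names]
--             for tex in all_textures}
-- ===== Notes on version B (the rewrite author's own statement) =====
-- stated objective: alternative
-- what changed: Inverted the loop nesting: A threads a pre-seeded texture->ids dict through nested model/path loops with contains and 'not in' list guards; B first computes each model's set of short names in a staged pass, then builds each texture's id list by a per-texture scan over those sets, with no mutated accumulator dict.
import Mathlib
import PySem

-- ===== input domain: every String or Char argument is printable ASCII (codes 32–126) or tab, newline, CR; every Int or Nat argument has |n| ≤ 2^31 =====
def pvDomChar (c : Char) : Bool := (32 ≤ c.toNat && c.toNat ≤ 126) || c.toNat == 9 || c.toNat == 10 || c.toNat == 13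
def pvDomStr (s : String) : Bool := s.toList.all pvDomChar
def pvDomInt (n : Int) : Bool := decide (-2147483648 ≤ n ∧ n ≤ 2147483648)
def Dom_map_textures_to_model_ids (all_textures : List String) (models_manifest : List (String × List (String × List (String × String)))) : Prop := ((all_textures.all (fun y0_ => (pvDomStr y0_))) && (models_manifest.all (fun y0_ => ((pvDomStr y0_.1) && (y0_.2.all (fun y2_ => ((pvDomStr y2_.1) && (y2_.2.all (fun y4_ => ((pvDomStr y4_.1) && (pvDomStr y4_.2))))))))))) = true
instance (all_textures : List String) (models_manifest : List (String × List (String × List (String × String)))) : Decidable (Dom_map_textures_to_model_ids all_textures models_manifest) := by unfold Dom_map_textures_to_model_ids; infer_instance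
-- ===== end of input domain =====

-- B inverts A's loop nesting (per-model short-name sets first, then one scan per texture); same return value, proved equal.

-- ===== PORT A =====
-- shared short-name extraction: tex_path.split("/")[-1] if "/" in it, else tex_path.replace("minecraft:", "")
def pvShortName (tex_path : String) : String :=
  if PySem.Str.isIn "/" tex_path then
    PySem.List.pyGetD ((PySem.Str.split? tex_path "/").getD []) (-1) ""
  else
    PySem.Str.replace tex_path "minecraft:" ""

-- model_content.get("textures", {}).values()
def pvTexPaths (model_content : List (String × List (String × String))) : List String :=
  (PySem.Dict.ofList ((PySem.Dict.ofList model_content).getD "textures" [])).values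

-- body of A's innermost loop (one tex_path of one model_id)
def pvStepTex (model_id : String) (d : PySem.Dict String (List String)) (tex_path : String) : PySem.Dict String (List String) :=
  if d.contains (pvShortName tex_path) then
    if (d.getD (pvShortName tex_path) []).contains model_id then d
    else d.modify (pvShortName tex_path) [] (fun l => l ++ [model_id])
  else d

-- body of A's outer loop (one model)
def pvStepModel (d : PySem.Dict String (List String)) (p : String × List (String × List (String × String))) : PySem.Dict String (List String) :=
  (pvTexPaths p.2).foldl (pvStepTex p.1) d

def map_textures_to_model_ids (all_textures : List String) (models_manifest : List (String × List (String × List (String × String)))) : List (String × List String) :=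
  let texture_to_ids : PySem.Dict String (List String) :=
    all_textures.foldl (fun d tex => d.insert tex []) PySem.Dict.empty
  ((PySem.Dict.ofList models_manifest).items.foldl pvStepModel texture_to_ids).items

-- ===== PORT B =====
-- names_of(content): set built by adding each path's short name (Set.ofList = foldl add)
def pvNamesOf (content : List (String × List (String × String))) : PySem.Set String :=
  PySem.Set.ofList ((pvTexPaths content).map pvShortName)

def map_textures_to_model_ids_alt (all_textures : List String) (models_manifest : List (String × List (String × List (String × String)))) : List (String × List String) :=
  let model_names : List (String × PySem.Set String) :=
    (PySem.Dict.ofList models_manifest).items.map (fun p => (p.1, pvNamesOf p.2))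
  (all_textures.foldl
    (fun d tex =>
      d.insert tex (model_names.filterMap
        (fun q => if PySem.Set.contains q.2 tex then some q.1 else none)))
    PySem.Dict.empty).items

-- ===== PRECONDITION & SPEC =====
def Spec_map_textures_to_model_ids (all_textures : List String) (models_manifest : List (String × List (String × List (String × String)))) (out : List (String × List String)) : Prop := out = map_textures_to_model_ids_alt all_textures models_manifest
instance (all_textures : List String) (models_manifest : List (String × List (String × List (String × String)))) (out : List (String × List String)) : Decidable (Spec_map_textures_to_model_ids all_textures models_manifest out) := by unfold Spec_map_textures_to_model_ids; infer_instance

-- ===== CLAIM (what is proved, stated in full; the proofs are below) =====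
def Claim_equal_map_textures_to_model_ids : Prop := ∀ (all_textures : List String) (models_manifest : List (String × List (String × List (String × String)))), Dom_map_textures_to_model_ids all_textures models_manifest → Spec_map_textures_to_model_ids all_textures models_manifest (map_textures_to_model_ids all_textures models_manifest)

-- ===== LEMMAS AND PROOFS =====

-- the per-texture id list A ends up with (and B computes directly, modulo sets)
def pvIdsA (ms : List (String × List (String × List (String × String)))) (t : String) : List String :=
  ms.filterMap (fun p => if t ∈ (pvTexPaths p.2).map pvShortName then some p.1 else none)

theorem pvIdsA_cons (p : String × List (String × List (String × String)))
    (rest : List (String × List (String × List (String × String)))) (t : String) :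
    pvIdsA (p :: rest) t =
      (if t ∈ (pvTexPaths p.2).map pvShortName then [p.1] else []) ++ pvIdsA rest t := by
  unfold pvIdsA
  rw [List.filterMap_cons]
  by_cases h1 : t ∈ (pvTexPaths p.2).map pvShortName
  · rw [if_pos h1, if_pos h1]; rfl
  · rw [if_neg h1, if_neg h1]; rfl

theorem pvKeys_stepTex (mid : String) (d : PySem.Dict String (List String)) (tp : String) :
    (pvStepTex mid d tp).keys = d.keys := by
  unfold pvStepTex
  split_ifs with h1 h2
  · rfl
  · rw [PySem.Dict.keys_modify, PySem.Dict.keys_insert_of_contains _ _ h1]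
  · rfl

theorem pvKeys_foldTex (mid : String) (ps : List String) (d : PySem.Dict String (List String)) :
    ((ps.foldl (pvStepTex mid) d).keys) = d.keys := by
  induction ps generalizing d with
  | nil => rfl
  | cons tp rest ih => simp only [List.foldl_cons, ih, pvKeys_stepTex]

theorem pvGetD_stepTex (mid : String) (d : PySem.Dict String (List String)) (tp t : String) :
    (pvStepTex mid d tp).getD t [] =
      if t = pvShortName tp ∧ d.contains t = true ∧ mid ∉ d.getD t [] then d.getD t [] ++ [mid]
      else d.getD t [] := by
  unfold pvStepTex
  by_cases ht : t = pvShortName tp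
  · subst ht
    split_ifs with h1 h2 h3 h4 h5 <;>
      simp_all [List.contains_eq_mem]
  · have hns : ¬(t = pvShortName tp ∧ d.contains t = true ∧ mid ∉ d.getD t []) := by
      intro h; exact ht h.1
    rw [if_neg hns]
    split_ifs with h1 h2
    · rfl
    · rw [PySem.Dict.getD_modify]
      simp [ht]
    · rfl

theorem pvGetD_foldTex (mid : String) (ps : List String) (d : PySem.Dict String (List String)) (t : String) :
    ((ps.foldl (pvStepTex mid) d).getD t []) =
      d.getD t [] ++
        (if t ∈ ps.map pvShortName ∧ d.contains t = true ∧ mid ∉ d.getD t [] then [mid] else []) := by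
  induction ps generalizing d with
  | nil => simp
  | cons tp rest ih =>
    simp only [List.foldl_cons]
    have hc : (pvStepTex mid d tp).contains t = d.contains t := by
      rw [PySem.Dict.contains_eq_decide_mem_keys, PySem.Dict.contains_eq_decide_mem_keys,
        pvKeys_stepTex]
    rw [ih, pvGetD_stepTex, hc]
    by_cases hmem : mid ∈ d.getD t []
    · simp [hmem]
    · by_cases hcont : d.contains t = true
      · by_cases htp : t = pvShortName tp
        · subst htp; simp [hmem, hcont]
        · by_cases hrest : t ∈ rest.map pvShortName <;>
            simp [hmem, hcont, htp, hrest]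
      · simp [hmem, hcont]

theorem pvKeys_foldModel (ms : List (String × List (String × List (String × String)))) (d : PySem.Dict String (List String)) :
    ((ms.foldl pvStepModel d).keys) = d.keys := by
  induction ms generalizing d with
  | nil => rfl
  | cons p rest ih => simp only [List.foldl_cons, ih, pvStepModel, pvKeys_foldTex]

theorem pvGetD_foldModel (ms : List (String × List (String × List (String × String)))) (t : String)
    (d : PySem.Dict String (List String)) (hnd : (ms.map Prod.fst).Nodup)
    (hfresh : ∀ p ∈ ms, p.1 ∉ d.getD t []) :
    ((ms.foldl pvStepModel d).getD t []) =
      d.getD t [] ++ (if d.contains t = true then pvIdsA ms t else []) := by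
  induction ms generalizing d with
  | nil => simp [pvIdsA]
  | cons p rest ih =>
    simp only [List.map_cons, List.nodup_cons] at hnd
    have hp : p.1 ∉ d.getD t [] := hfresh p (by simp)
    have hd1 : (pvStepModel d p).getD t [] =
        d.getD t [] ++ (if t ∈ (pvTexPaths p.2).map pvShortName ∧ d.contains t = true then [p.1] else []) := by
      rw [pvStepModel, pvGetD_foldTex]
      by_cases h1 : t ∈ (pvTexPaths p.2).map pvShortName <;>
        by_cases h2 : d.contains t = true <;> simp [h1, h2, hp]
    have hc1 : (pvStepModel d p).contains t = d.contains t := by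
      rw [pvStepModel, PySem.Dict.contains_eq_decide_mem_keys,
        PySem.Dict.contains_eq_decide_mem_keys, pvKeys_foldTex]
    have hfresh2 : ∀ q ∈ rest, q.1 ∉ (pvStepModel d p).getD t [] := by
      intro q hq
      rw [hd1]
      have hq1 : q.1 ∉ d.getD t [] := hfresh q (by simp [hq])
      have hq2 : q.1 ≠ p.1 := by
        intro he; exact hnd.1 (he ▸ (List.mem_map.mpr ⟨q, hq, rfl⟩))
      simp [hq1, hq2]
    simp only [List.foldl_cons]
    rw [ih (pvStepModel d p) hnd.2 hfresh2, hd1, hc1, pvIdsA_cons]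
    by_cases h1 : t ∈ (pvTexPaths p.2).map pvShortName <;>
      by_cases h2 : d.contains t = true <;>
      simp [h1, h2, List.append_assoc]

theorem pvGetD_insert_nil (l : List String) (t : String) (d : PySem.Dict String (List String))
    (h : d.getD t [] = []) :
    ((l.foldl (fun d x => d.insert x ([] : List String)) d).getD t []) = [] := by
  induction l generalizing d with
  | nil => exact h
  | cons x rest ih =>
    simp only [List.foldl_cons]
    refine ih _ ?_
    by_cases hx : t = x
    · subst hx; rw [PySem.Dict.getD_insert_self]
    · rw [PySem.Dict.getD_insert_of_ne _ _ _ hx]; exact h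

theorem pvGetD_insert_fun (g : String → List String) (l : List String) (t : String)
    (d : PySem.Dict String (List String)) :
    ((l.foldl (fun d x => d.insert x (g x)) d).getD t []) =
      if t ∈ l then g t else d.getD t [] := by
  induction l generalizing d with
  | nil => simp
  | cons x rest ih =>
    simp only [List.foldl_cons]
    rw [ih]
    by_cases hr : t ∈ rest
    · simp [hr]
    · by_cases hx : t = x
      · subst hx; simp [hr, PySem.Dict.getD_insert_self]
      · simp [hr, hx, PySem.Dict.getD_insert_of_ne _ _ _ hx]

theorem pvKeys_insert_fun (g : String → List String) (l : List String) :
    ((l.foldl (fun d x => d.insert x (g x)) (PySem.Dict.empty : PySem.Dict String (List String))).keys) =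
      PySem.Set.ofList l := by
  rw [PySem.Dict.keys_foldl_insert l (fun _ x => g x), PySem.Dict.keys_empty,
    PySem.Set.update_nil_left]

-- B's per-texture scan over the precomputed name sets computes exactly pvIdsA
theorem pvFilterMap_names (l : List (String × List (String × List (String × String)))) (t : String) :
    ((l.map (fun p => (p.1, pvNamesOf p.2))).filterMap
        (fun q => if PySem.Set.contains q.2 t then some q.1 else none)) = pvIdsA l t := by
  induction l with
  | nil => rfl
  | cons p rest ih =>
    have hc : PySem.Set.contains (pvNamesOf p.2) t = decide (t ∈ (pvTexPaths p.2).map pvShortName) := by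
      simp [pvNamesOf, PySem.Set.contains, List.contains_eq_mem, PySem.Set.mem_ofList]
    rw [List.map_cons, List.filterMap_cons, pvIdsA_cons, ih, hc]
    by_cases h1 : t ∈ (pvTexPaths p.2).map pvShortName <;> simp [h1]

-- ===== VERDICT (by name: the statement is the Claim_ definition above) =====
theorem map_textures_to_model_ids_spec : Claim_equal_map_textures_to_model_ids := by
  intro all_textures models_manifest _
  unfold Spec_map_textures_to_model_ids map_textures_to_model_ids map_textures_to_model_ids_alt
  set M := PySem.Dict.ofList models_manifest with hM
  set d0 : PySem.Dict String (List String) :=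
    all_textures.foldl (fun d tex => d.insert tex []) PySem.Dict.empty with hd0
  have hkeys0 : d0.keys = PySem.Set.ofList all_textures := pvKeys_insert_fun (fun _ => []) _
  have hkeysA : (M.items.foldl pvStepModel d0).keys = PySem.Set.ofList all_textures := by
    rw [pvKeys_foldModel, hkeys0]
  have hndA : (M.items.foldl pvStepModel d0).keys.Nodup := by
    rw [hkeysA]; exact PySem.Set.nodup_ofList _
  set g : String → List String := fun tex =>
    (M.items.map (fun p => (p.1, pvNamesOf p.2))).filterMap
      (fun q => if PySem.Set.contains q.2 tex then some q.1 else none) with hg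
  set dB : PySem.Dict String (List String) :=
    all_textures.foldl (fun d tex => d.insert tex (g tex)) PySem.Dict.empty with hdB
  have hkeysB : dB.keys = PySem.Set.ofList all_textures := pvKeys_insert_fun _ _
  have hndB : dB.keys.Nodup := by rw [hkeysB]; exact PySem.Set.nodup_ofList _
  rw [PySem.Dict.items_eq_map_keys _ hndA [], PySem.Dict.items_eq_map_keys _ hndB [],
    hkeysA, hkeysB]
  apply List.map_congr_left
  intro t ht
  have htl : t ∈ all_textures := (PySem.Set.mem_ofList _ _).mp ht
  have hcont0 : d0.contains t = true := by
    rw [PySem.Dict.contains_iff_mem_keys, hkeys0]; exact ht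
  have hget0 : d0.getD t [] = [] := pvGetD_insert_nil _ _ _ (PySem.Dict.getD_empty _ _)
  have hA : (M.items.foldl pvStepModel d0).getD t [] = pvIdsA M.items t := by
    rw [pvGetD_foldModel M.items t d0 (PySem.Dict.nodup_keys_ofList models_manifest)
      (fun p _ => by rw [hget0]; exact List.not_mem_nil)]
    rw [hget0, hcont0]
    simp
  have hB : dB.getD t [] = pvIdsA M.items t := by
    rw [hdB, pvGetD_insert_fun, if_pos htl]
    exact pvFilterMap_names M.items t
  rw [hA, hB]
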